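-- pv_equiv track=rewrite | github.com/danieladina/Dynamic_planning_algorithm | LIS.py | LIS_Greedy
-- ===== SOURCE A (Python) =====
-- def LIS_Greedy(arr):
--     '''
--     * The Greedy Algorithm for LIS
--     * Complexity: O(n)
--     :param arr: number sequence
--     :return: increasing sequence
--     '''
--     if len(arr) <= 0:
--         return []
--     res = [arr[0]]
--     k = 0
--     for i in range(1, len(arr)):
--         if arr[i] > res[k]:
--             k += 1
--             res.insert(k, arr[i])
--     return res
-- ===== SOURCE B (Python) =====
-- def LIS_Greedy(arr):
--     # Table-then-filter: build the prefix-maximum table in one pass,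
--     # then keep prefix[0] and every strict increase of the table.
--     if not arr:
--         return []
--     prefix = arr[:1]
--     for x in arr[1:]:
--         prefix.append(max(prefix[-1], x))
--     return prefix[:1] + [cur for prev, cur in zip(prefix, prefix[1:]) if cur > prev]
-- ===== Notes on version B (the rewrite author's own statement) =====
-- stated objective: alternative
-- what changed: A grows the result inside one inline comparison loop with an insert position counter; B first materializes the full prefix-maximum table in one pass and then builds the result by a second filtering pass that keeps the table's head and each strict increase.
import Mathlib
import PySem

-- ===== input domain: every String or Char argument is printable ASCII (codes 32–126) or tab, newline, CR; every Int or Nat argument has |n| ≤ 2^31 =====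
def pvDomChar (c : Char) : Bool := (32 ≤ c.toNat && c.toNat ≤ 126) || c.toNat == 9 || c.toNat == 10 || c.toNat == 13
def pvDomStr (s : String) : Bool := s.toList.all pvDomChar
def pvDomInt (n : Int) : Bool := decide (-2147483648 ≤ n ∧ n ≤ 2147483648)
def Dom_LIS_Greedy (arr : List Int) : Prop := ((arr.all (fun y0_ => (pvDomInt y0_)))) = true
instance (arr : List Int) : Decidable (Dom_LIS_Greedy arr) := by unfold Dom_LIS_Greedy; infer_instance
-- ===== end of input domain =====

-- B replaces A's single inline greedy-insert loop by an explicit prefix-maximum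
-- table built first, followed by a filtering pass (alternative decomposition, same cost).

-- ===== PORT A =====
-- loop body of A's for-loop: state (res, k), element arr[i]
def stepA (st : List Int × Int) (x : Int) : List Int × Int :=
  if x > PySem.List.pyGetD st.1 st.2 0 then
    (PySem.List.insert st.1 (st.2 + 1) x, st.2 + 1)
  else st

def LIS_Greedy (arr : List Int) : List Int :=
  if arr.length ≤ 0 then []
  else
    let st := (PySem.List.pyRange 1 arr.length 1).foldl
      (fun st i => stepA st (PySem.List.pyGetD arr i 0))
      ([PySem.List.pyGetD arr 0 0], 0)
    st.1

-- ===== PORT B =====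
def LIS_Greedy_alt (arr : List Int) : List Int :=
  match arr with
  | [] => []
  | a :: t =>
    let pre := t.foldl (fun p x => p ++ [max (PySem.List.pyGetD p (-1) a) x]) [a]
    pre.take 1 ++ (pre.zip (pre.drop 1)).filterMap
      (fun pc => if pc.2 > pc.1 then some pc.2 else none)

-- ===== PRECONDITION & SPEC =====
def Spec_LIS_Greedy (arr : List Int) (out : List Int) : Prop := out = LIS_Greedy_alt arr
instance (arr : List Int) (out : List Int) : Decidable (Spec_LIS_Greedy arr out) := by unfold Spec_LIS_Greedy; infer_instance

-- ===== CLAIM (what is proved, stated in full; the proofs are below) =====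
def Claim_equal_LIS_Greedy : Prop := ∀ (arr : List Int), Dom_LIS_Greedy arr → Spec_LIS_Greedy arr (LIS_Greedy arr)

-- ===== LEMMAS AND PROOFS =====

-- canonical value: strict running maxima of t above current best m
def runMax (m : Int) : List Int → List Int
  | [] => []
  | x :: t => if x > m then x :: runMax x t else runMax m t

lemma A_loop (t : List Int) : ∀ (r : List Int) (hr : r ≠ []),
    (t.foldl stepA (r, (r.length : Int) - 1)).1 = r ++ runMax (r.getLast hr) t := by
  induction t with
  | nil => intro r hr; simp [runMax]
  | cons x t ih =>
    intro r hr
    have hlen : 1 ≤ r.length := List.length_pos_iff.mpr hr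
    have hget : PySem.List.pyGetD r ((r.length : Int) - 1) 0 = r.getLast hr := by
      have h1 : ((r.length : Int) - 1) = ((r.length - 1 : Nat) : Int) := by omega
      rw [h1, PySem.List.pyGetD_natCast, List.getLast_eq_getElem]
      exact List.getD_eq_getElem r 0 (by omega)
    simp only [List.foldl_cons]
    by_cases h : x > r.getLast hr
    · have hstep : stepA (r, (r.length : Int) - 1) x
          = (r ++ [x], ((r ++ [x]).length : Int) - 1) := by
        simp only [stepA, hget]
        rw [if_pos h]
        have h2 : (r.length : Int) - 1 + 1 = ((r.length : Nat) : Int) := by omega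
        rw [h2, PySem.List.insert_natCast r r.length x (le_refl _)]
        simp
      rw [hstep, ih (r ++ [x]) (by simp)]
      have hlast : (r ++ [x]).getLast (by simp) = x := by
        simp
      rw [hlast]
      simp [runMax, h]
    · have hstep : stepA (r, (r.length : Int) - 1) x = (r, (r.length : Int) - 1) := by
        simp only [stepA, hget]
        rw [if_neg h]
      rw [hstep, ih r hr]
      simp [runMax, h]

lemma A_cons (a : Int) (t : List Int) : LIS_Greedy (a :: t) = a :: runMax a t := by
  unfold LIS_Greedy
  rw [if_neg (by simp),
    PySem.List.foldl_pyRange_pyGetD' (a :: t) 0 stepA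
      ([PySem.List.pyGetD (a :: t) 0 0], (0 : Int)) (show (0 : Int) ≤ 1 by norm_num)]
  simp only [PySem.List.pyGetD_zero_cons, Int.toNat_one, List.drop_succ_cons, List.drop_zero]
  simpa using A_loop t [a] (by simp)

-- B's prefix loop builds exactly the scanl-max table
lemma B_prefix (a : Int) (t : List Int) : ∀ (r : List Int) (m : Int) (hr : r ≠ []),
    r.getLast hr = m →
    t.foldl (fun p x => p ++ [max (PySem.List.pyGetD p (-1) a) x]) r
      = r.dropLast ++ List.scanl max m t := by
  induction t with
  | nil =>
    intro r m hr hm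
    rw [List.foldl_nil, List.scanl_nil, ← hm, List.dropLast_concat_getLast hr]
  | cons x t ih =>
    intro r m hr hm
    simp only [List.foldl_cons]
    rw [PySem.List.pyGetD_neg_one r a hr, hm,
      ih (r ++ [max m x]) (max m x) (by simp) (by simp),
      List.dropLast_concat, List.scanl_cons]
    conv_rhs => rw [show r.dropLast ++ m :: List.scanl max (max m x) t
      = (r.dropLast ++ [m]) ++ List.scanl max (max m x) t by simp]
    rw [← hm, List.dropLast_concat_getLast hr]

-- the zip-filter of the scanl-max table is the strict running maxima
lemma B_filter (t : List Int) : ∀ (a : Int),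
    ((List.scanl max a t).zip ((List.scanl max a t).drop 1)).filterMap
        (fun pc => if pc.2 > pc.1 then some pc.2 else none)
      = runMax a t := by
  induction t with
  | nil => intro a; simp [List.scanl_nil, runMax]
  | cons x t ih =>
    intro a
    rw [List.scanl_cons]
    have hhead : List.scanl max (max a x) t
        = (max a x) :: (List.scanl max (max a x) t).drop 1 := by
      cases t <;> simp [List.scanl_cons, List.scanl_nil]
    simp only [List.drop_succ_cons, List.drop_zero]
    conv_lhs => rw [hhead]
    rw [List.zip_cons_cons, List.filterMap_cons, ← hhead, ih (max a x)]
    by_cases h : x > a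
    · have hm : max a x = x := max_eq_right (le_of_lt h)
      simp [hm, h, runMax]
    · have hm : max a x = a := max_eq_left (by omega)
      simp [hm, runMax, h]

lemma B_cons (a : Int) (t : List Int) : LIS_Greedy_alt (a :: t) = a :: runMax a t := by
  simp only [LIS_Greedy_alt]
  rw [B_prefix a t [a] a (by simp) rfl,
    show ([a] : List Int).dropLast = [] from rfl, List.nil_append, B_filter t a]
  have htake : (List.scanl max a t).take 1 = [a] := by
    cases t <;> simp [List.scanl_cons, List.scanl_nil]
  rw [htake]
  simp

-- ===== VERDICT (by name: the statement is the Claim_ definition above) =====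
theorem LIS_Greedy_spec : Claim_equal_LIS_Greedy := by
  intro arr _
  unfold Spec_LIS_Greedy
  cases arr with
  | nil => rfl
  | cons a t => rw [A_cons, B_cons]
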